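-- pv_equiv track=rewrite | github.com/baodexiang/gcc-evolution | docs/history/doc/files/apply_p0_enhancement.py | find_insertion_points
-- ===== SOURCE A (Python) =====
-- def find_insertion_points(content):
--     """查找插入位置"""
--     lines = content.split('\n')
--
--     # 查找函数定义区域 (在compute_l2_local_exec_bias之前)
--     func_insert_line = None
--     for i, line in enumerate(lines):
--         if 'def compute_l2_local_exec_bias' in line:
--             func_insert_line = i
--             break
--
--     # 查找N-Swing逻辑插入点 (elif down_ratio <= 0.97: 之后)
--     nswing_insert_line = None
--     for i, line in enumerate(lines):
--         if 'elif down_ratio <= 0.97:' in line: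
--             # 找到这行后，继续找到下一个非空行
--             for j in range(i+1, len(lines)):
--                 if lines[j].strip() and not lines[j].strip().startswith('#'):
--                     nswing_insert_line = j
--                     break
--             break
--
--     return func_insert_line, nswing_insert_line
-- ===== SOURCE B (Python) =====
-- def find_insertion_points(content):
--     """查找插入位置"""
--     func_insert_line = None
--     nswing_insert_line = None
--     seek_nswing = False
--     for i, line in enumerate(content.split('\n')):
--         if func_insert_line is None and 'def compute_l2_local_exec_bias' in line:
--             func_insert_line = i
--         if seek_nswing:
--             s = line.strip()
--             if s and not s.startswith('#'):
--                 nswing_insert_line = i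
--                 seek_nswing = False
--         elif nswing_insert_line is None and 'elif down_ratio <= 0.97:' in line:
--             seek_nswing = True
--     return func_insert_line, nswing_insert_line
-- ===== Notes on version B (the rewrite author's own statement) =====
-- stated objective: simpler
-- what changed: Replaces A's two separate scans (the second with a nested index loop over range(i+1, len(lines))) by one single pass over enumerate(lines) maintaining both results and a seek flag.
import Mathlib
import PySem

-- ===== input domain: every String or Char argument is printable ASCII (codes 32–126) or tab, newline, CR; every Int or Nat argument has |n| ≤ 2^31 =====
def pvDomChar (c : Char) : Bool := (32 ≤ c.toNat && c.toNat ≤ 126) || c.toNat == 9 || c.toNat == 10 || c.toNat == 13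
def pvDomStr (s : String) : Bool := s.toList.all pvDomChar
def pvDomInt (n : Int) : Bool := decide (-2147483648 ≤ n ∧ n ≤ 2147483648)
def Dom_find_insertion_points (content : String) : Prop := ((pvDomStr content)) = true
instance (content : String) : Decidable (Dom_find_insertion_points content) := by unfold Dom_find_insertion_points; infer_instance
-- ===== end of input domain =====

-- B replaces A's two separate scans (one with a nested index loop) by one single pass
-- over enumerate(lines) maintaining both answers and a seek flag (objective: simpler).

-- shared line tests (the literal conditions of both Pythons)
def pvIsFunc (line : String) : Bool := PySem.Str.isIn "def compute_l2_local_exec_bias" line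
def pvIsElif (line : String) : Bool := PySem.Str.isIn "elif down_ratio <= 0.97:" line
-- "line.strip() and not line.strip().startswith('#')" (truthiness test)
def pvGood (line : String) : Bool :=
  !(PySem.Str.strip line == "") && !(PySem.Str.startswith (PySem.Str.strip line) "#")

-- ===== PORT A =====
-- first loop: for i, line in enumerate(lines): if 'def compute_l2_local_exec_bias' in line: break
def pvALoop1 : List (Int × String) → Option Int
  | [] => none
  | (i, line) :: rest => if pvIsFunc line then some i else pvALoop1 rest

-- inner loop: for j in range(i+1, len(lines)): if lines[j].strip() and not … '#': break
def pvAInner (lines : List String) : List Int → Option Int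
  | [] => none
  | j :: rest =>
    match PySem.List.pyGet? lines j with
    | none => none   -- unreachable: j produced by range(i+1, len(lines))
    | some l => if pvGood l then some j else pvAInner lines rest

-- second outer loop
def pvALoop2 (lines : List String) : List (Int × String) → Option Int
  | [] => none
  | (i, line) :: rest =>
    if pvIsElif line then pvAInner lines (PySem.List.pyRange (i + 1) (lines.length : Int) 1)
    else pvALoop2 lines rest

def find_insertion_points (content : String) : Option Int × Option Int :=
  let lines := (PySem.Str.split? content "\n").getD []   -- sep "\n" ≠ "": split? is some
  (pvALoop1 (PySem.List.enumerate lines 0), pvALoop2 lines (PySem.List.enumerate lines 0))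

-- ===== PORT B =====
-- one step of Source B's single loop; state = (func_insert_line, nswing_insert_line, seek_nswing)
def pvBStep (st : Option Int × Option Int × Bool) (p : Int × String) :
    Option Int × Option Int × Bool :=
  let f := if st.1 = none ∧ pvIsFunc p.2 then some p.1 else st.1
  if st.2.2 then
    if pvGood p.2 then (f, some p.1, false) else (f, st.2.1, true)
  else if st.2.1 = none ∧ pvIsElif p.2 then (f, st.2.1, true)
  else (f, st.2.1, false)

def find_insertion_points_alt (content : String) : Option Int × Option Int :=
  let lines := (PySem.Str.split? content "\n").getD []
  let st := (PySem.List.enumerate lines 0).foldl pvBStep (none, none, false)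
  (st.1, st.2.1)

-- ===== PRECONDITION & SPEC =====
def Spec_find_insertion_points (content : String) (out : Option Int × Option Int) : Prop := out = find_insertion_points_alt content
instance (content : String) (out : Option Int × Option Int) : Decidable (Spec_find_insertion_points content out) := by unfold Spec_find_insertion_points; infer_instance

-- ===== CLAIM (what is proved, stated in full; the proofs are below) =====
def Claim_equal_find_insertion_points : Prop := ∀ (content : String), Dom_find_insertion_points content → Spec_find_insertion_points content (find_insertion_points content)

-- ===== LEMMAS AND PROOFS =====

-- canonical forms, used only by the proofs
def canonF : Int → List String → Option Int
  | _, [] => none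
  | n, l :: ls => if pvIsFunc l then some n else canonF (n + 1) ls

def canonG : Int → List String → Option Int
  | _, [] => none
  | n, l :: ls => if pvGood l then some n else canonG (n + 1) ls

def canonE : Int → List String → Option Int
  | _, [] => none
  | n, l :: ls => if pvIsElif l then canonG (n + 1) ls else canonE (n + 1) ls

def hasElif (ls : List String) : Bool := ls.any pvIsElif

lemma pvALoop1_eq (ls : List String) : ∀ n, pvALoop1 (PySem.List.enumerate ls n) = canonF n ls := by
  induction ls with
  | nil => intro n; simp [PySem.List.enumerate_nil, pvALoop1, canonF]
  | cons l ls ih =>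
    intro n
    rw [PySem.List.enumerate_cons]
    simp only [pvALoop1, canonF]
    split_ifs with h <;> simp [ih]

lemma pvAInner_eq (lines : List String) : ∀ (d k : Nat), lines.length = k + d →
    pvAInner lines (PySem.List.pyRange (k : Int) (lines.length : Int) 1) = canonG (k : Int) (lines.drop k) := by
  intro d
  induction d with
  | zero =>
    intro k hk
    rw [PySem.List.pyRange_one_eq_nil (by omega)]
    rw [List.drop_of_length_le (by omega)]
    simp [pvAInner, canonG]
  | succ d ih =>
    intro k hk
    have hlt : (k : Int) < (lines.length : Int) := by omega
    rw [PySem.List.pyRange_one_cons hlt]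
    have hk' : k < lines.length := by omega
    have hget : PySem.List.pyGet? lines (k : Int) = some lines[k] := by
      simp [PySem.List.pyGet?_natCast, List.getElem?_eq_getElem hk']
    have hdrop : lines.drop k = lines[k] :: lines.drop (k + 1) := (List.getElem_cons_drop hk').symm
    rw [hdrop]
    simp only [pvAInner, hget, canonG]
    split_ifs with h
    · rfl
    · have := ih (k + 1) (by omega)
      push_cast at this ⊢
      rw [this]

lemma pvALoop2_eq (lines : List String) : ∀ (d k : Nat), lines.length = k + d →
    pvALoop2 lines (PySem.List.enumerate (lines.drop k) (k : Int)) = canonE (k : Int) (lines.drop k) := by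
  intro d
  induction d with
  | zero =>
    intro k hk
    rw [List.drop_of_length_le (by omega)]
    simp [PySem.List.enumerate_nil, pvALoop2, canonE]
  | succ d ih =>
    intro k hk
    have hk' : k < lines.length := by omega
    have hdrop : lines.drop k = lines[k] :: lines.drop (k + 1) := (List.getElem_cons_drop hk').symm
    rw [hdrop, PySem.List.enumerate_cons]
    simp only [pvALoop2, canonE]
    split_ifs with h
    · have := pvAInner_eq lines d (k + 1) (by omega)
      push_cast at this ⊢
      rw [this]
    · have := ih (k + 1) (by omega)
      push_cast at this ⊢
      exact this

-- the single-pass fold, characterised against the canonical forms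
lemma foldB_eq (ls : List String) : ∀ (n : Int) (f ns : Option Int) (seek : Bool),
    (seek = true → ns = none) →
    (PySem.List.enumerate ls n).foldl pvBStep (f, ns, seek) =
      (f.or (canonF n ls),
       ns.or (if seek then canonG n ls else canonE n ls),
       if ns.isSome then false
       else if seek then (canonG n ls).isNone
       else hasElif ls && (canonE n ls).isNone) := by
  induction ls with
  | nil =>
    intro n f ns seek hinv
    rcases ns with _ | v
    · cases seek <;> simp [PySem.List.enumerate_nil, canonF, canonG, canonE, hasElif]
    · have hs : seek = false := by cases seek <;> simp_all
      subst hs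
      simp [PySem.List.enumerate_nil, canonF, canonE]
  | cons l ls ih =>
    intro n f ns seek hinv
    rw [PySem.List.enumerate_cons, List.foldl_cons]
    cases seek with
    | true =>
      have hns : ns = none := hinv rfl
      subst hns
      by_cases hg : pvGood l = true
      · have hstep : pvBStep (f, none, true) (n, l) =
            ((if f = none ∧ pvIsFunc l then some n else f), some n, false) := by
          simp [pvBStep, hg]
        rw [hstep, ih (n + 1) _ _ _ (by simp)]
        rcases f with _ | a <;> by_cases hif : pvIsFunc l = true <;>
          simp [canonF, canonG, hg, hif, Option.or]
      · have hg' : pvGood l = false := by simpa using hg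
        have hstep : pvBStep (f, none, true) (n, l) =
            ((if f = none ∧ pvIsFunc l then some n else f), none, true) := by
          simp [pvBStep, hg']
        rw [hstep, ih (n + 1) _ _ _ (by simp)]
        rcases f with _ | a <;> by_cases hif : pvIsFunc l = true <;>
          simp [canonF, canonG, hg', hif, Option.or]
    | false =>
      rcases ns with _ | v
      · by_cases he : pvIsElif l = true
        · have hstep : pvBStep (f, none, false) (n, l) =
              ((if f = none ∧ pvIsFunc l then some n else f), none, true) := by
            simp [pvBStep, he]
          rw [hstep, ih (n + 1) _ _ _ (by simp)]
          rcases f with _ | a <;> by_cases hif : pvIsFunc l = true <;>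
            simp [canonF, canonE, hasElif, he, hif, Option.or]
        · have he' : pvIsElif l = false := by simpa using he
          have hstep : pvBStep (f, none, false) (n, l) =
              ((if f = none ∧ pvIsFunc l then some n else f), none, false) := by
            simp [pvBStep, he']
          rw [hstep, ih (n + 1) _ _ _ (by simp)]
          rcases f with _ | a <;> by_cases hif : pvIsFunc l = true <;>
            simp [canonF, canonE, hasElif, he', hif, Option.or]
      · have hstep : pvBStep (f, some v, false) (n, l) =
            ((if f = none ∧ pvIsFunc l then some n else f), some v, false) := by
          simp [pvBStep]
        rw [hstep, ih (n + 1) _ _ _ (by simp)]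
        rcases f with _ | a <;> by_cases hif : pvIsFunc l = true <;>
          simp [canonF, hif, Option.or]

-- ===== VERDICT (by name: the statement is the Claim_ definition above) =====
theorem find_insertion_points_spec : Claim_equal_find_insertion_points := by
  intro content _
  unfold Spec_find_insertion_points find_insertion_points find_insertion_points_alt
  dsimp only
  generalize (PySem.Str.split? content "\n").getD [] = lines
  rw [foldB_eq lines 0 none none false (by simp)]
  have h1 := pvALoop1_eq lines 0
  have h2 := pvALoop2_eq lines lines.length 0 (by omega)
  simp only [List.drop_zero, Nat.cast_zero] at h2
  simp [h1, h2, Option.or]
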